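-- pv_equiv track=rewrite | github.com/OkaDarmayasa/review | app.py | combine_di_with_next
-- ===== SOURCE A (Python) =====
-- def combine_di_with_next(text):
--     words = text.split()
--     combined_text = []
--     i = 0
--     while i < len(words):
--         if words[i] == 'di' and i < len(words) - 1:
--             combined_text.append('di' + words[i+1])  # Combine "di" with the next word
--             i += 1
--         else:
--             combined_text.append(words[i])
--         i += 1
--     return ' '.join(combined_text)
-- ===== SOURCE B (Python) =====
-- def combine_di_with_next(text):
--     s = ' ' + ' '.join(text.split())
--     return s.replace(' di ', ' di')[1:]
-- ===== Notes on version B (the rewrite author's own statement) =====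
-- stated objective: idiomatic
-- what changed: Drops A's index-based while loop over a word list entirely: B normalizes whitespace with ' '.join(text.split()), prepends a sentinel space, and performs one non-overlapping string replace of ' di ' by ' di', whose consumed trailing space makes the following word unmatchable exactly like A's skip-by-two.
import Mathlib
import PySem

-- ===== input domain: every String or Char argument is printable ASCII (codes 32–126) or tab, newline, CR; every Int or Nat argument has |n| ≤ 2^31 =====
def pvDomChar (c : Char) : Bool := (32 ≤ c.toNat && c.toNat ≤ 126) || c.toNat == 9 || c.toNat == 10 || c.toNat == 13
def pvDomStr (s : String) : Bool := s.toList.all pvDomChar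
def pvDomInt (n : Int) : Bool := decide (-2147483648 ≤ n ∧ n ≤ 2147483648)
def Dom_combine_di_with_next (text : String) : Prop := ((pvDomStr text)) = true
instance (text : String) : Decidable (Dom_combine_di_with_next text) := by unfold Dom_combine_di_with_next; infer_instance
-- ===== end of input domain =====

-- B replaces A's index/skip while loop over the word list by one string-level
-- substring replace of ' di ' on the space-normalized text; objective: idiomatic.

-- ===== PORT A =====
-- A's while loop: index i over the word list, appending to combined_text.
def pvLoopA (ws : List String) (i : Nat) (acc : List String) : List String :=
  if _h : i < ws.length then
    if ws.getD i "" = "di" ∧ i < ws.length - 1 then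
      pvLoopA ws (i + 2) (acc ++ ["di" ++ ws.getD (i + 1) ""])
    else
      pvLoopA ws (i + 1) (acc ++ [ws.getD i ""])
  else acc
termination_by ws.length - i

def combine_di_with_next (text : String) : String :=
  PySem.Str.join " " (pvLoopA (PySem.Str.split₀ text) 0 [])

-- ===== PORT B =====
-- Source B: s = ' ' + ' '.join(text.split()); return s.replace(' di ', ' di')[1:]
-- (' ' + … is string concatenation, ported exactly as consing the space onto the code points)
def combine_di_with_next_alt (text : String) : String :=
  let s : String := String.ofList (' ' :: (PySem.Str.join " " (PySem.Str.split₀ text)).toList)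
  PySem.Str.slice (PySem.Str.replace s " di " " di") (some 1) none

-- ===== PRECONDITION & SPEC =====
def Spec_combine_di_with_next (text : String) (out : String) : Prop := out = combine_di_with_next_alt text
instance (text : String) (out : String) : Decidable (Spec_combine_di_with_next text out) := by unfold Spec_combine_di_with_next; infer_instance

-- ===== CLAIM (what is proved, stated in full; the proofs are below) =====
def Claim_equal_combine_di_with_next : Prop := ∀ (text : String), Dom_combine_di_with_next text → Spec_combine_di_with_next text (combine_di_with_next text)

-- ===== LEMMAS AND PROOFS =====

-- Word-level result of A's loop: merge each 'di' with its successor, skip two.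
def pvMergeS : List String → List String
  | [] => []
  | w :: r =>
    if w = "di" then
      match r with
      | [] => [w]
      | x :: r' => (w ++ x) :: pvMergeS r'
    else w :: pvMergeS r

theorem pvLoopA_eq (ws : List String) (i : Nat) (acc : List String) :
    pvLoopA ws i acc = acc ++ pvMergeS (ws.drop i) := by
  induction i, acc using pvLoopA.induct (ws := ws) with
  | case1 i acc h hc IH =>
      obtain ⟨hdi, hlt⟩ := hc
      have h1 : i + 1 < ws.length := by omega
      have hdi' : ws[i] = "di" := by rw [← List.getD_eq_getElem ws "" h]; exact hdi
      rw [pvLoopA, dif_pos h, if_pos ⟨hdi, hlt⟩, IH,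
          List.drop_eq_getElem_cons h, List.drop_eq_getElem_cons h1, hdi',
          List.getD_eq_getElem ws "" h1]
      simp only [pvMergeS, if_true, List.append_assoc, List.singleton_append]
  | case2 i acc h hc IH =>
      have hg : ws.getD i "" = ws[i] := List.getD_eq_getElem ws "" h
      rw [pvLoopA, dif_pos h, if_neg hc, IH, List.drop_eq_getElem_cons h, hg]
      by_cases hdi : ws[i] = "di"
      · have hge : ws.length ≤ i + 1 := by
          by_contra hx
          exact hc ⟨by rw [hg, hdi], by omega⟩
        rw [List.drop_eq_nil_of_le hge]
        simp only [pvMergeS, hdi, if_true, List.append_assoc, List.singleton_append]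
      · conv_rhs => rw [pvMergeS.eq_def]
        simp only [if_neg hdi, List.append_assoc, List.singleton_append]
  | case3 i acc h =>
      rw [pvLoopA, dif_neg h, List.drop_eq_nil_of_le (by omega : ws.length ≤ i)]
      simp [pvMergeS]

-- The same merge at the code-point level.
def pvMergeC : List (List Char) → List (List Char)
  | [] => []
  | w :: r =>
    if w = ['d', 'i'] then
      match r with
      | [] => [w]
      | x :: r' => (w ++ x) :: pvMergeC r'
    else w :: pvMergeC r

theorem pvMergeC_map (ws : List String) :
    pvMergeC (ws.map String.toList) = (pvMergeS ws).map String.toList := by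
  induction ws using pvMergeS.induct with
  | case1 => simp [pvMergeS, pvMergeC]
  | case2 => simp [pvMergeS, pvMergeC]
  | case3 x r' IH =>
      have hdl : ("di" : String).toList = ['d', 'i'] := by decide
      simp only [List.map_cons, pvMergeS, pvMergeC, hdl, if_true, IH, List.map]
      simp [String.toList_append, hdl]
  | case4 w r hdi IH =>
      have hdl : w.toList ≠ ['d', 'i'] := by
        intro hx
        exact hdi (String.toList_inj.mp (by simpa using hx))
      rw [List.map_cons]
      rw [pvMergeC.eq_def, pvMergeS.eq_def]
      simp only [if_neg hdi, if_neg hdl, IH, List.map_cons]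

-- ' '-prefixed flattening: each word preceded by one space.
def pvFlat (ws : List (List Char)) : List Char := ws.flatMap (fun w => ' ' :: w)

theorem pvFlat_join (ws : List (List Char)) (h : ws ≠ []) :
    ' ' :: PySem.Chars.join [' '] ws = pvFlat ws := by
  induction ws with
  | nil => exact absurd rfl h
  | cons w r IH =>
      cases r with
      | nil => simp [PySem.Chars.join_singleton, pvFlat]
      | cons q r' =>
          rw [PySem.Chars.join_cons_cons]
          have := IH (by simp)
          simp only [pvFlat, List.flatMap_cons] at this ⊢
          rw [← this]
          simp

theorem pv_go_nil (old new : List Char) (fuel : Nat) (acc : List Char) :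
    PySem.Chars.replace.go old new fuel [] acc = acc.reverse := by
  cases fuel <;> simp [PySem.Chars.replace.go]

-- one non-matching character is moved onto the accumulator
theorem pv_go_step (fuel : Nat) (c : Char) (t acc : List Char)
    (h : List.isPrefixOf [' ', 'd', 'i', ' '] (c :: t) = false) :
    PySem.Chars.replace.go [' ', 'd', 'i', ' '] [' ', 'd', 'i'] (fuel + 1) (c :: t) acc =
      PySem.Chars.replace.go [' ', 'd', 'i', ' '] [' ', 'd', 'i'] fuel t (c :: acc) := by
  rw [PySem.Chars.replace.go.eq_def]
  simp [h]

-- a match consumes ' di ' and deposits the replacement ' di' (reversed)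
theorem pv_go_hit (fuel : Nat) (t acc : List Char) :
    PySem.Chars.replace.go [' ', 'd', 'i', ' '] [' ', 'd', 'i'] (fuel + 1)
        (' ' :: 'd' :: 'i' :: ' ' :: t) acc =
      PySem.Chars.replace.go [' ', 'd', 'i', ' '] [' ', 'd', 'i'] fuel t ('i' :: 'd' :: ' ' :: acc) := by
  rw [PySem.Chars.replace.go.eq_def]
  have hp : List.isPrefixOf [' ', 'd', 'i', ' '] (' ' :: 'd' :: 'i' :: ' ' :: t) = true := by
    simp [List.isPrefixOf]
  simp [hp]

-- scanning through non-space characters: no match can start there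
theorem pv_go_word (w : List Char) (hw : ∀ c ∈ w, c ≠ ' ') :
    ∀ (fuel : Nat) (l acc : List Char), w.length ≤ fuel →
    PySem.Chars.replace.go [' ', 'd', 'i', ' '] [' ', 'd', 'i'] fuel (w ++ l) acc =
      PySem.Chars.replace.go [' ', 'd', 'i', ' '] [' ', 'd', 'i'] (fuel - w.length) l (w.reverse ++ acc) := by
  induction w with
  | nil =>
      intro fuel l acc _
      simp only [List.nil_append, List.length_nil, Nat.sub_zero, List.reverse_nil]
  | cons c w' IH =>
      intro fuel l acc hf
      obtain ⟨f, rfl⟩ : ∃ f, fuel = f + 1 := ⟨fuel - 1, by simp at hf; omega⟩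
      have hc : (' ' == c) = false := beq_eq_false_iff_ne.mpr (Ne.symm (hw c (by simp)))
      have hpf : List.isPrefixOf [' ', 'd', 'i', ' '] (c :: (w' ++ l)) = false := by
        simp [List.isPrefixOf, hc]
      rw [List.cons_append, pv_go_step f c _ acc hpf]
      rw [IH (fun x hx => hw x (by simp [hx])) f l (c :: acc) (by simp at hf; omega)]
      simp only [List.length_cons, Nat.succ_sub_succ]
      congr 1
      simp

-- a separator space followed by a word w ≠ "di" (or by the final word "di") never matches ' di '
theorem pv_no_match (w : List Char) (r : List (List Char)) (hw : ∀ c ∈ w, c ≠ ' ')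
    (hdi : w ≠ ['d', 'i']) :
    List.isPrefixOf [' ', 'd', 'i', ' '] (' ' :: (w ++ pvFlat r)) = false := by
  match w with
  | [] =>
      cases r with
      | nil => simp [pvFlat, List.isPrefixOf]
      | cons q r' => simp [pvFlat, List.isPrefixOf]
  | [c] =>
      cases r with
      | nil => simp [pvFlat, List.isPrefixOf]
      | cons q r' => simp [pvFlat, List.isPrefixOf]
  | [c1, c2] =>
      by_cases h1 : c1 = 'd'
      · subst h1
        have h2 : ('i' == c2) = false := beq_eq_false_iff_ne.mpr (fun h => hdi (by rw [← h]))
        simp [pvFlat, List.isPrefixOf, h2]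
      · have h1' : ('d' == c1) = false := beq_eq_false_iff_ne.mpr (Ne.symm h1)
        simp [pvFlat, List.isPrefixOf, h1']
  | c1 :: c2 :: c3 :: t =>
      have h3 : (' ' == c3) = false := beq_eq_false_iff_ne.mpr (Ne.symm (hw c3 (by simp)))
      simp [List.isPrefixOf, h3]

theorem pv_go_main (ws : List (List Char)) :
    ∀ (fuel : Nat) (acc : List Char), (∀ w ∈ ws, ∀ c ∈ w, c ≠ ' ') →
    (pvFlat ws).length ≤ fuel →
    PySem.Chars.replace.go [' ', 'd', 'i', ' '] [' ', 'd', 'i'] fuel (pvFlat ws) acc =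
      acc.reverse ++ pvFlat (pvMergeC ws) := by
  induction ws using pvMergeC.induct with
  | case1 =>
      intro fuel acc _ _
      simp [pvFlat, pvMergeC, pv_go_nil]
  | case2 =>
      intro fuel acc _ hf
      have hf3 : 3 ≤ fuel := by simpa [pvFlat] using hf
      obtain ⟨f, rfl⟩ : ∃ f, fuel = f + 3 := ⟨fuel - 3, by omega⟩
      show PySem.Chars.replace.go _ _ (f + 3) (' ' :: 'd' :: 'i' :: []) acc = _
      rw [show f + 3 = f + 2 + 1 from rfl, pv_go_step _ _ _ _ (by decide)]
      rw [show f + 2 = f + 1 + 1 from rfl, pv_go_step _ _ _ _ (by decide)]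
      rw [pv_go_step _ _ _ _ (by decide), pv_go_nil]
      simp [pvMergeC, pvFlat]
  | case3 x r' IH =>
      intro fuel acc hws hf
      have hx : ∀ c ∈ x, c ≠ ' ' := hws x (by simp)
      have hflat : pvFlat (['d', 'i'] :: x :: r') =
          ' ' :: 'd' :: 'i' :: ' ' :: (x ++ pvFlat r') := by
        simp [pvFlat]
      rw [hflat] at hf ⊢
      have hfl : 4 + (x.length + (pvFlat r').length) ≤ fuel := by
        simp at hf; omega
      obtain ⟨f, rfl⟩ : ∃ f, fuel = f + 1 := ⟨fuel - 1, by omega⟩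
      rw [pv_go_hit f _ acc]
      rw [pv_go_word x hx f (pvFlat r') _ (by omega)]
      rw [IH (f - x.length) _ (fun w hw => hws w (by simp [hw])) (by omega)]
      simp [pvMergeC, pvFlat]
  | case4 w r hdi IH =>
      intro fuel acc hws hf
      have hw : ∀ c ∈ w, c ≠ ' ' := hws w (by simp)
      have hflat : pvFlat (w :: r) = ' ' :: (w ++ pvFlat r) := by simp [pvFlat]
      rw [hflat] at hf ⊢
      have hfl : 1 + (w.length + (pvFlat r).length) ≤ fuel := by simp at hf; omega
      obtain ⟨f, rfl⟩ : ∃ f, fuel = f + 1 := ⟨fuel - 1, by omega⟩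
      rw [pv_go_step f ' ' _ acc (pv_no_match w r hw hdi)]
      rw [pv_go_word w hw f (pvFlat r) _ (by omega)]
      rw [IH (f - w.length) _ (fun v hv => hws v (by simp [hv])) (by omega)]
      conv_rhs => rw [pvMergeC.eq_def]
      simp [hdi, pvFlat]

-- every word produced by text.split() is free of space characters
theorem pv_split₀_go_no_space :
    ∀ (s cur : List Char) (acc : List (List Char)),
    (∀ c ∈ cur, PySem.Chars.isspace c = false) →
    (∀ w ∈ acc, ∀ c ∈ w, PySem.Chars.isspace c = false) →
    ∀ w ∈ PySem.Chars.split₀.go s cur acc, ∀ c ∈ w, PySem.Chars.isspace c = false := by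
  intro s
  induction s with
  | nil =>
      intro cur acc hcur hacc w hw
      simp only [PySem.Chars.split₀.go] at hw
      by_cases he : cur.isEmpty = true
      · rw [if_pos he] at hw
        exact hacc w (by simpa using hw)
      · rw [if_neg he] at hw
        rcases (by simpa using hw : w ∈ acc ∨ w = cur.reverse) with h | h
        · exact hacc w h
        · subst h
          intro c hc
          exact hcur c (by simpa using hc)
  | cons c rest IH =>
      intro cur acc hcur hacc w hw
      simp only [PySem.Chars.split₀.go] at hw
      by_cases hsp : PySem.Chars.isspace c = true
      · rw [if_pos hsp] at hw
        by_cases he : cur.isEmpty = true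
        · rw [if_pos he] at hw
          exact IH [] acc (by simp) hacc w hw
        · rw [if_neg he] at hw
          refine IH [] (cur.reverse :: acc) (by simp) ?_ w hw
          intro v hv
          rcases List.mem_cons.mp hv with h | h
          · subst h
            intro d hd
            exact hcur d (by simpa using hd)
          · exact hacc v h
      · rw [if_neg hsp] at hw
        refine IH (c :: cur) acc ?_ hacc w hw
        intro d hd
        rcases List.mem_cons.mp hd with h | h
        · simpa [h] using Bool.eq_false_iff.mpr hsp
        · exact hcur d h

theorem pv_split₀_no_space (text : String) :
    ∀ w ∈ PySem.Str.split₀ text, ∀ c ∈ w.toList, c ≠ ' ' := by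
  intro w hw c hc hcsp
  have hmem : w.toList ∈ PySem.Chars.split₀ text.toList := by
    rw [← PySem.Str.split₀_map_toList]
    exact List.mem_map_of_mem hw
  have := pv_split₀_go_no_space text.toList [] [] (by simp) (by simp) w.toList hmem c hc
  rw [hcsp] at this
  exact absurd this (by decide)

-- ===== VERDICT (by name: the statement is the Claim_ definition above) =====
theorem combine_di_with_next_spec : Claim_equal_combine_di_with_next := by
  intro text _
  unfold Spec_combine_di_with_next combine_di_with_next combine_di_with_next_alt
  rw [pvLoopA_eq]
  simp only [List.drop_zero, List.nil_append]
  apply String.toList_inj.mp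
  rw [PySem.Str.toList_slice, PySem.Str.toList_replace, String.toList_ofList]
  have hsp0 := pv_split₀_no_space text
  cases hws : PySem.Str.split₀ text with
  | nil => decide
  | cons w r =>
      have hsp : ∀ v ∈ (w :: r).map String.toList, ∀ c ∈ v, c ≠ ' ' := by
        intro v hv c hc
        obtain ⟨u, hu, rfl⟩ := List.mem_map.mp hv
        exact hsp0 u (by rw [hws]; exact hu) c hc
      have hjoin : ' ' :: (PySem.Str.join " " (w :: r)).toList =
          pvFlat ((w :: r).map String.toList) := by
        rw [PySem.Str.toList_join]
        exact pvFlat_join _ (by simp)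
      have hrep : PySem.Chars.replace (' ' :: (PySem.Str.join " " (w :: r)).toList)
          (" di ").toList (" di").toList = pvFlat (pvMergeC ((w :: r).map String.toList)) := by
        show PySem.Chars.replace _ [' ', 'd', 'i', ' '] [' ', 'd', 'i'] = _
        rw [PySem.Chars.replace]
        simp only [List.isEmpty_cons, Bool.false_eq_true, if_false]
        rw [hjoin, pv_go_main ((w :: r).map String.toList) _ [] hsp (le_refl _)]
        simp
      rw [hrep, pvMergeC_map]
      have hmne : pvMergeS (w :: r) ≠ [] := by
        cases r with
        | nil => simp [pvMergeS]
        | cons q r2 =>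
            by_cases h : w = "di" <;> simp [pvMergeS, h]
      rw [PySem.Chars.slice_eq_listSlice]
      have hs1 := PySem.List.slice_from
        (xs := pvFlat (List.map String.toList (pvMergeS (w :: r)))) (a := 1) (by norm_num)
      simp only [hs1, Int.toNat_one]
      rw [PySem.Str.toList_join, ← pvFlat_join _ (by simpa using hmne)]
      simp
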